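-- pv_equiv track=rewrite | github.com/MatheusAgF/MyAgenda | agenda.py | ordenarPorHora
-- ===== SOURCE A (Python) =====
-- def ordenarPorHora(itens, cont=0):
--   #[(descricao, (prioridade, data, hora, contexto, projeto))]
--   if cont >= len(itens): return itens
--
--   for i in range(1, len(itens)):
--     j = i - 1
--     atual = itens[i]
--     antecessor = itens[j]
--
--     if atual[1][1] == antecessor[1][1]:
--       if atual[1][2] == '': continue
--
--       if antecessor[1][2] == '':
--         itens[j], itens[i] = itens[i], itens[j]
--         continue
--
--       if atual[1][2] < antecessor[1][2]:
--         itens[j], itens[i] = itens[i], itens[j]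
--
--   return ordenarPorHora(itens, cont+1)
-- ===== SOURCE B (Python) =====
-- def ordenarPorHora(itens, cont=0):
--     if cont >= len(itens):
--         return itens
--     out = []
--     i = 0
--     while i < len(itens):
--         data = itens[i][1][1]
--         j = i
--         while j < len(itens) and itens[j][1][1] == data:
--             j += 1
--         out.extend(sorted(itens[i:j], key=lambda it: (it[1][2] == '', it[1][2])))
--         i = j
--     return out
-- ===== Notes on version B (the rewrite author's own statement) =====
-- stated objective: alternative
-- what changed: A bubble-sorts by hora with len(itens) full adjacent-swap passes (recursing on an internal counter cont); B makes one grouping pass that cuts the list into contiguous equal-date runs and stable-sorts each run once with sorted(key=(hora=='', hora)).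
-- outside the precondition, e.g. on ordenarPorHora([('a', ())], 0): A returns [('a', ())], B raises IndexError
import Mathlib
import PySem

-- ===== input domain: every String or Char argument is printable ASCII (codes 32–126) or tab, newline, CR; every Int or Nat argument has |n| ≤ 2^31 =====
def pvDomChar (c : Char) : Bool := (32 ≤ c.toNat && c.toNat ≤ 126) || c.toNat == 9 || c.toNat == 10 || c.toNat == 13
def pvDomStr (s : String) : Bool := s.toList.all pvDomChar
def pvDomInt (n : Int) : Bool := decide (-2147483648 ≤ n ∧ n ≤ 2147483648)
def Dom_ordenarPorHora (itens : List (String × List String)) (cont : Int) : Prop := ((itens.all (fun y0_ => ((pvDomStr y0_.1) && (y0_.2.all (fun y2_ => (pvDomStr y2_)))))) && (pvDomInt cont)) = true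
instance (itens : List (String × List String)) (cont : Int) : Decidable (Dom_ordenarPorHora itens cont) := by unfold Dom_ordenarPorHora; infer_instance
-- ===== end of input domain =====

-- B replaces A's repeated adjacent-swap bubble passes by a single grouping pass over the
-- contiguous equal-date runs, stable-sorting each run once by the key (hora == '', hora).
-- A mutates `itens` in place (adjacent swaps) and returns it; B builds a fresh list —
-- the equivalence proved here is about the RETURN value only.

-- ===== PORT A =====
-- itens[k][1][1] (data) and itens[k][1][2] (hora); pyGetD is exact under Pre_ (all inner lists have ≥ 3 fields)
def pvDget (p : String × List String) : String := PySem.List.pyGetD p.2 1 ""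
def pvHget (p : String × List String) : String := PySem.List.pyGetD p.2 2 ""

-- the body of A's `for i in range(1, len(itens))` loop: one left-to-right adjacent
-- compare-and-swap pass, carrying the element currently at position i-1
def pvPass (prev : String × List String) : List (String × List String) → List (String × List String)
  | [] => [prev]
  | cur :: rest =>
    if pvDget cur == pvDget prev then
      if pvHget cur == "" then prev :: pvPass cur rest
      else if pvHget prev == "" then cur :: pvPass prev rest
      else if pvHget cur < pvHget prev then cur :: pvPass prev rest
      else prev :: pvPass cur rest
    else prev :: pvPass cur rest

def pvSweep : List (String × List String) → List (String × List String)
  | [] => []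
  | x :: xs => pvPass x xs

theorem pvPass_length (prev : String × List String) (xs : List (String × List String)) :
    (pvPass prev xs).length = xs.length + 1 := by
  induction xs generalizing prev with
  | nil => simp [pvPass]
  | cons c t ih => simp only [pvPass]; split_ifs <;> simp [ih]

theorem pvSweep_length (xs : List (String × List String)) : (pvSweep xs).length = xs.length := by
  cases xs with
  | nil => rfl
  | cons x t => simp [pvSweep, pvPass_length]

def ordenarPorHora (itens : List (String × List String)) (cont : Int) : List (String × List String) :=
  if (itens.length : Int) ≤ cont then itens
  else ordenarPorHora (pvSweep itens) (cont + 1)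
termination_by ((itens.length : Int) - cont).toNat
decreasing_by
  rw [pvSweep_length]
  omega

-- ===== PORT B =====
def pvGroupSort : List (String × List String) → List (String × List String)
  | [] => []
  | x :: xs =>
    PySem.List.sorted2 (x :: xs.takeWhile (fun y => pvDget y == pvDget x))
        (fun p => pvHget p == "") (fun p => pvHget p)
      ++ pvGroupSort (xs.dropWhile (fun y => pvDget y == pvDget x))
termination_by xs => xs.length
decreasing_by
  simp only [List.length_cons]
  have := List.length_dropWhile_le (fun y => pvDget y == pvDget x) xs
  omega

def ordenarPorHora_alt (itens : List (String × List String)) (cont : Int) : List (String × List String) :=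
  if (itens.length : Int) ≤ cont then itens
  else pvGroupSort itens

-- ===== PRECONDITION & SPEC =====
-- Pre_ excludes (i) items whose field list has fewer than 3 entries, on which A's
-- itens[k][1][1] / itens[k][1][2] raises IndexError (for a singleton list A skips the loop
-- and returns, while B's sort-key access still raises); and (ii) calls where the internal
-- recursion counter cont is not the entry value 0 (nor ≥ len(itens), where A is the
-- identity): for 0 < cont < len(itens) A performs only len(itens)-cont bubble passes and
-- returns an accidentally partially-sorted list, and for cont < 0 A's recursion depth
-- len(itens)-cont exceeds Python's recursion limit (RecursionError) once -cont is large.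
def Pre_ordenarPorHora (itens : List (String × List String)) (cont : Int) : Prop :=
  (itens.length : Int) ≤ cont ∨ (cont = 0 ∧ ∀ p ∈ itens, 3 ≤ p.2.length)
instance (itens : List (String × List String)) (cont : Int) : Decidable (Pre_ordenarPorHora itens cont) := by
  unfold Pre_ordenarPorHora; infer_instance

def pvWitness_ordenarPorHora : (List (String × List String)) × Int :=
  ([("a", ["p", "d", "09:00"]), ("b", ["p", "d", ""]), ("c", ["p", "d", "08:00"])], 0)

def Spec_ordenarPorHora (itens : List (String × List String)) (cont : Int) (out : List (String × List String)) : Prop := out = ordenarPorHora_alt itens cont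
instance (itens : List (String × List String)) (cont : Int) (out : List (String × List String)) : Decidable (Spec_ordenarPorHora itens cont out) := by unfold Spec_ordenarPorHora; infer_instance

-- ===== CLAIM (what is proved, stated in full; the proofs are below) =====
def Claim_equal_ordenarPorHora : Prop := ∀ (itens : List (String × List String)) (cont : Int), Dom_ordenarPorHora itens cont → Pre_ordenarPorHora itens cont → Spec_ordenarPorHora itens cont (ordenarPorHora itens cont)

-- ===== LEMMAS AND PROOFS =====

-- the strict comparator of B's sort: lexicographic on the key (hora == '', hora)
def pvHlt (a b : String × List String) : Bool :=
  decide ((pvHget a == "") < (pvHget b == "")) ||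
    (!decide ((pvHget b == "") < (pvHget a == "")) && decide (pvHget a < pvHget b))

def pvKey (p : String × List String) : Lex (Bool × String) := toLex (pvHget p == "", pvHget p)

theorem pvHlt_iff (a b : String × List String) :
    pvHlt a b = true ↔
      ((pvHget a == "") < (pvHget b == "") ∨
        ((pvHget a == "") = (pvHget b == "") ∧ pvHget a < pvHget b)) := by
  unfold pvHlt
  rcases lt_trichotomy (pvHget a == "") (pvHget b == "") with h | h | h
  · simp [h, lt_asymm h]
  · simp [h]
  · simp [lt_asymm h, h.ne']
    intro hh
    exact ((lt_irrefl _ (lt_of_lt_of_le h hh)).elim)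

theorem pvHlt_eq_lt (a b : String × List String) : pvHlt a b = true ↔ pvKey a < pvKey b := by
  rw [pvHlt_iff, pvKey, pvKey, Prod.Lex.lt_iff]
  rfl

theorem pvHlt_trans {a b c : String × List String} (h1 : pvHlt a b = true) (h2 : pvHlt b c = true) :
    pvHlt a c = true := by
  rw [pvHlt_eq_lt] at h1 h2 ⊢; exact lt_trans h1 h2

theorem pvHlt_asymm {a b : String × List String} (h : pvHlt a b = true) : pvHlt b a = false := by
  rw [← Bool.not_eq_true, pvHlt_eq_lt] at *; exact not_lt_of_gt h

theorem pvHle_trans {a b c : String × List String} (h1 : pvHlt b a = false) (h2 : pvHlt c b = false) :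
    pvHlt c a = false := by
  rw [← Bool.not_eq_true, pvHlt_eq_lt, not_lt] at *; exact le_trans h1 h2

-- A's branch cascade computes exactly "swap iff same date and pvHlt cur prev"
theorem pvPass_cons (p c : String × List String) (t : List (String × List String)) :
    pvPass p (c :: t) =
      if (pvDget c == pvDget p) && pvHlt c p then c :: pvPass p t else p :: pvPass c t := by
  by_cases hd : (pvDget c == pvDget p) = true
  · rcases h1 : (pvHget c == "") with _ | _
    · rcases h2 : (pvHget p == "") with _ | _
      · have hlt : pvHlt c p = decide (pvHget c < pvHget p) := by
          rcases h3 : decide (pvHget c < pvHget p) with _ | _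
          · rw [← Bool.not_eq_true, pvHlt_iff, h1, h2]
            simp at h3
            simp [h3]
          · rw [pvHlt_iff, h1, h2]
            simp at h3
            simp [h3]
        by_cases h3 : pvHget c < pvHget p
        · simp [pvPass, hd, h1, h2, h3, hlt]
        · simp [pvPass, hd, h1, h2, h3, hlt]
      · have hlt : pvHlt c p = true := by
          rw [pvHlt_iff, h1, h2]
          simp [Bool.lt_iff]
        simp [pvPass, hd, h1, h2, hlt]
    · have hlt : pvHlt c p = false := by
        rw [← Bool.not_eq_true, pvHlt_iff, h1]
        rcases hp : (pvHget p == "") with _ | _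
        · simp [Bool.lt_iff]
        · have hc : pvHget c = "" := by simpa using h1
          have hp' : pvHget p = "" := by simpa using hp
          simp [hc, hp']
      simp [pvPass, hd, h1, hlt]
  · simp only [Bool.not_eq_true] at hd
    simp [pvPass, hd]

-- the bubble pass restricted to a single equal-date run
def pvBPass (p : String × List String) : List (String × List String) → List (String × List String)
  | [] => [p]
  | c :: t => if pvHlt c p then c :: pvBPass p t else p :: pvBPass c t

theorem pvBPass_length (p : String × List String) (t : List (String × List String)) :
    (pvBPass p t).length = t.length + 1 := by
  induction t generalizing p with
  | nil => rfl
  | cons c t ih => simp only [pvBPass]; split <;> simp [ih]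

theorem pvBPass_mem {y p : String × List String} {t : List (String × List String)} :
    y ∈ pvBPass p t ↔ y ∈ p :: t := by
  induction t generalizing p with
  | nil => simp [pvBPass]
  | cons c t ih =>
    simp only [pvBPass]
    split
    · simp only [List.mem_cons, ih]
      tauto
    · simp only [List.mem_cons, ih]

-- a sweep decomposes along the first equal-date run
theorem pvPass_run (t : List (String × List String)) (x p : String × List String)
    (hp : pvDget p = pvDget x) :
    pvPass p t = pvBPass p (t.takeWhile (fun y => pvDget y == pvDget x))
      ++ pvSweep (t.dropWhile (fun y => pvDget y == pvDget x)) := by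
  induction t generalizing p with
  | nil => simp [pvPass, pvBPass, pvSweep]
  | cons c t ih =>
    rw [pvPass_cons]
    by_cases hc : pvDget c = pvDget x
    · have hcp : (pvDget c == pvDget p) = true := by simp [hc, hp]
      simp only [List.takeWhile_cons, List.dropWhile_cons,
        show (pvDget c == pvDget x) = true by simp [hc], if_true, hcp, Bool.true_and, pvBPass]
      by_cases hsw : pvHlt c p = true
      · simp [hsw, ih p hp]
      · simp only [Bool.not_eq_true] at hsw
        simp [hsw, ih c hc]
    · have hcp : (pvDget c == pvDget p) = false := by
        simp only [beq_eq_false_iff_ne, ne_eq]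
        rw [hp]; exact hc
      simp [show (pvDget c == pvDget x) = false by simp [hc], hcp, pvBPass, pvSweep]

theorem pvSweep_cons (x : String × List String) (xs : List (String × List String)) :
    pvSweep (x :: xs) = pvBPass x (xs.takeWhile (fun y => pvDget y == pvDget x))
      ++ pvSweep (xs.dropWhile (fun y => pvDget y == pvDget x)) :=
  pvPass_run xs x x rfl

def pvSweepN : Nat → List (String × List String) → List (String × List String)
  | 0, xs => xs
  | k + 1, xs => pvSweepN k (pvSweep xs)

def pvBPassN : Nat → List (String × List String) → List (String × List String)
  | 0, r => r
  | _ + 1, [] => []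
  | k + 1, p :: t => pvBPassN k (pvBPass p t)

theorem pvSweepN_nil (k : Nat) : pvSweepN k [] = [] := by
  induction k with
  | zero => rfl
  | succ k ih => simpa [pvSweepN, pvSweep] using ih

theorem ordenarPorHora_eq_sweepN (itens : List (String × List String)) (cont : Int) :
    ordenarPorHora itens cont = pvSweepN ((itens.length - cont).toNat) itens := by
  induction itens, cont using ordenarPorHora.induct with
  | case1 itens cont hle =>
    rw [ordenarPorHora, if_pos hle]
    have : ((itens.length : Int) - cont).toNat = 0 := by omega
    rw [this]
    rfl
  | case2 itens cont hle ih =>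
    rw [ordenarPorHora, if_neg hle, ih, pvSweep_length]
    have : ((itens.length : Int) - cont).toNat = ((itens.length : Int) - (cont + 1)).toNat + 1 := by
      omega
    rw [this]
    rfl

theorem pvSweep_head (B : List (String × List String)) (h' : String × List String)
    (hh : h' ∈ (pvSweep B).head?) : ∃ b ∈ B.head?, pvDget h' = pvDget b := by
  cases B with
  | nil => simp [pvSweep] at hh
  | cons b t =>
    refine ⟨b, by simp, ?_⟩
    rw [pvSweep_cons] at hh
    have hne : pvBPass b (t.takeWhile (fun y => pvDget y == pvDget b)) ≠ [] := by
      intro hemp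
      have := pvBPass_length b (t.takeWhile (fun y => pvDget y == pvDget b))
      rw [hemp] at this
      simp at this
    rw [List.head?_append_of_ne_nil _ hne] at hh
    have hmem : h' ∈ pvBPass b (t.takeWhile (fun y => pvDget y == pvDget b)) :=
      List.mem_of_mem_head? hh
    rw [pvBPass_mem, List.mem_cons] at hmem
    rcases hmem with hmem | hmem
    · rw [hmem]
    · have := List.mem_takeWhile_imp hmem
      simpa using this

theorem pvSweepN_decomp (k : Nat) (A B : List (String × List String)) (v : String)
    (hA : A ≠ []) (hAv : ∀ y ∈ A, pvDget y = v) (hB : ∀ h ∈ B.head?, pvDget h ≠ v) :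
    pvSweepN k (A ++ B) = pvBPassN k A ++ pvSweepN k B := by
  induction k generalizing A B with
  | zero => rfl
  | succ k ih =>
    cases A with
    | nil => exact absurd rfl hA
    | cons a A' =>
      have hav : pvDget a = v := hAv a List.mem_cons_self
      have hall : ∀ y ∈ A', (fun y => pvDget y == pvDget a) y = true := by
        intro y hy
        simp [hAv y (List.mem_cons_of_mem _ hy), hav]
      have htwB : B.takeWhile (fun y => pvDget y == pvDget a) = [] := by
        cases B with
        | nil => rfl
        | cons b t =>
          rw [List.takeWhile_cons, if_neg]
          simp only [beq_iff_eq]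
          rw [hav]
          exact hB b (by simp)
      have h1 : (A' ++ B).takeWhile (fun y => pvDget y == pvDget a) = A' := by
        rw [List.takeWhile_append, if_pos (by rw [List.takeWhile_eq_self_iff.mpr hall]), htwB,
          List.append_nil]
      have h2 : (A' ++ B).dropWhile (fun y => pvDget y == pvDget a) = B := by
        rw [List.dropWhile_append, if_pos (by simp [List.dropWhile_eq_nil_iff.mpr hall])]
        cases B with
        | nil => rfl
        | cons b t =>
          rw [List.dropWhile_cons, if_neg]
          simp only [beq_iff_eq]
          rw [hav]
          exact hB b (by simp)
      have hstep : pvSweep ((a :: A') ++ B) = pvBPass a A' ++ pvSweep B := by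
        rw [List.cons_append, pvSweep_cons, h1, h2]
      show pvSweepN k (pvSweep ((a :: A') ++ B)) = pvBPassN k (pvBPass a A') ++ pvSweepN k (pvSweep B)
      rw [hstep]
      refine ih (pvBPass a A') (pvSweep B) ?_ ?_ ?_
      · intro hemp
        have := pvBPass_length a A'
        rw [hemp] at this
        simp at this
      · intro y hy
        rw [pvBPass_mem, List.mem_cons] at hy
        rcases hy with hy | hy
        · rw [hy]; exact hav
        · exact hAv y (List.mem_cons_of_mem _ hy)
      · intro h hh
        obtain ⟨b, hb, heq⟩ := pvSweep_head B h hh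
        rw [heq]
        exact hB b hb

-- stability: one bubble pass does not change the stable sort
theorem pvIns_comm (c p : String × List String) (h : pvHlt c p = true)
    (acc : List (String × List String)) :
    PySem.List.insertBy pvHlt p (PySem.List.insertBy pvHlt c acc)
      = PySem.List.insertBy pvHlt c (PySem.List.insertBy pvHlt p acc) := by
  induction acc with
  | nil => simp [PySem.List.insertBy, pvHlt_asymm h, h]
  | cons a acc ih =>
    rcases hpa : pvHlt p a with _ | _
    · rcases hca : pvHlt c a with _ | _
      · simp [PySem.List.insertBy, hpa, hca, ih]
      · simp [PySem.List.insertBy, hpa, hca, pvHlt_asymm h]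
    · have hca : pvHlt c a = true := pvHlt_trans h hpa
      simp [PySem.List.insertBy, hpa, hca, h, pvHlt_asymm h]

theorem pvSorted2_eq_foldl (xs : List (String × List String)) :
    PySem.List.sorted2 xs (fun p => pvHget p == "") (fun p => pvHget p)
      = xs.foldl (fun acc x => PySem.List.insertBy pvHlt x acc) [] := rfl

theorem pvFoldl_ins_bpass (t : List (String × List String)) :
    ∀ (p : String × List String) (acc : List (String × List String)),
      (pvBPass p t).foldl (fun acc x => PySem.List.insertBy pvHlt x acc) acc
        = (p :: t).foldl (fun acc x => PySem.List.insertBy pvHlt x acc) acc := by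
  induction t with
  | nil => intro p acc; rfl
  | cons c t ih =>
    intro p acc
    rcases hsw : pvHlt c p with _ | _
    · simp only [pvBPass, hsw, Bool.false_eq_true, if_false, List.foldl_cons]
      exact ih c _
    · simp only [pvBPass, hsw, if_true, List.foldl_cons]
      rw [ih p _, List.foldl_cons, pvIns_comm c p hsw acc]

theorem pvIns_append_max (x : String × List String) (acc : List (String × List String))
    (h : ∀ y ∈ acc, pvHlt x y = false) :
    PySem.List.insertBy pvHlt x acc = acc ++ [x] := by
  induction acc with
  | nil => rfl
  | cons a t ih =>
    simp only [PySem.List.insertBy, h a (by simp), Bool.false_eq_true, if_false, List.cons_append,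
      List.cons.injEq, true_and]
    exact ih fun y hy => h y (by simp [hy])

theorem pvSorted2_eq_self (r : List (String × List String))
    (h : r.Pairwise (fun a b => pvHlt b a = false)) :
    PySem.List.sorted2 r (fun p => pvHget p == "") (fun p => pvHget p) = r := by
  rw [pvSorted2_eq_foldl]
  induction r using List.reverseRecOn with
  | nil => rfl
  | append_singleton r' x ih =>
    obtain ⟨h1, -, hrel⟩ := List.pairwise_append.mp h
    rw [List.foldl_append, List.foldl_cons, List.foldl_nil, ih h1]
    exact pvIns_append_max x r' fun y hy => hrel y hy x (by simp)

theorem pvHlt_irrefl (a : String × List String) : pvHlt a a = false := by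
  rw [← Bool.not_eq_true, pvHlt_eq_lt]
  exact lt_irrefl _

theorem pvHead_dropWhile {α} (p : α → Bool) (l : List α) (x : α)
    (h : x ∈ (l.dropWhile p).head?) : p x = false := by
  induction l with
  | nil => simp [List.dropWhile] at h
  | cons a t ih =>
    rw [List.dropWhile_cons] at h
    split at h
    · exact ih h
    · rename_i hp
      simp at h
      subst h
      simpa using hp

theorem pvBPass_split (t : List (String × List String)) (p : String × List String) :
    ∃ e m, pvBPass p t = e ++ [m] ∧ pvHlt m p = false ∧ (∀ y ∈ e, pvHlt m y = false) ∧
      e.length = t.length := by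
  induction t generalizing p with
  | nil => exact ⟨[], p, rfl, pvHlt_irrefl p, by simp, rfl⟩
  | cons c t ih =>
    rcases hsw : pvHlt c p with _ | _
    · obtain ⟨e, m, heq, hmc, hme, hlen⟩ := ih c
      refine ⟨p :: e, m, ?_, pvHle_trans hsw hmc, ?_, by simp [hlen]⟩
      · simp [pvBPass, hsw, heq]
      · intro y hy
        rcases List.mem_cons.mp hy with hy | hy
        · rw [hy]; exact pvHle_trans hsw hmc
        · exact hme y hy
    · obtain ⟨e, m, heq, hmp, hme, hlen⟩ := ih p
      have hmc : pvHlt m c = false := by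
        rcases hx : pvHlt m c with _ | _
        · rfl
        · rw [pvHlt_trans hx hsw] at hmp; exact hmp
      refine ⟨c :: e, m, ?_, hmp, ?_, by simp [hlen]⟩
      · simp [pvBPass, hsw, heq]
      · intro y hy
        rcases List.mem_cons.mp hy with hy | hy
        · rw [hy]; exact hmc
        · exact hme y hy

theorem pvBPass_append_max (t : List (String × List String)) (p m : String × List String)
    (h : ∀ y ∈ p :: t, pvHlt m y = false) :
    pvBPass p (t ++ [m]) = pvBPass p t ++ [m] := by
  induction t generalizing p with
  | nil => simp [pvBPass, h p (by simp)]
  | cons c t ih =>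
    simp only [List.cons_append, pvBPass]
    rcases hsw : pvHlt c p with _ | _
    · simp only [Bool.false_eq_true, if_false]
      rw [ih c fun y hy => h y (by simp at hy ⊢; tauto)]
      simp
    · simp only [if_true]
      rw [ih p fun y hy => h y (by simp at hy ⊢; tauto)]
      simp

theorem pvBPassN_singleton (k : Nat) (m : String × List String) : pvBPassN k [m] = [m] := by
  induction k with
  | zero => rfl
  | succ k ih => simpa [pvBPassN, pvBPass] using ih

theorem pvBPassN_mem (k : Nat) (r : List (String × List String)) (y : String × List String) :
    y ∈ pvBPassN k r ↔ y ∈ r := by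
  induction k generalizing r with
  | zero => rfl
  | succ k ih =>
    cases r with
    | nil => rfl
    | cons p t =>
      show y ∈ pvBPassN k (pvBPass p t) ↔ _
      rw [ih, pvBPass_mem]

theorem pvBPassN_append_max (k : Nat) (e : List (String × List String))
    (m : String × List String) (h : ∀ y ∈ e, pvHlt m y = false) :
    pvBPassN k (e ++ [m]) = pvBPassN k e ++ [m] := by
  induction k generalizing e with
  | zero => rfl
  | succ k ih =>
    cases e with
    | nil => simpa using pvBPassN_singleton (k + 1) m
    | cons q e' =>
      show pvBPassN k (pvBPass q (e' ++ [m])) = pvBPassN k (pvBPass q e') ++ [m]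
      rw [pvBPass_append_max e' q m fun y hy => h y hy, ih]
      intro y hy
      exact h y ((pvBPass_mem).mp hy)

theorem pvBPassN_sorted (k : Nat) (r : List (String × List String)) (hk : r.length ≤ k) :
    (pvBPassN k r).Pairwise (fun a b => pvHlt b a = false) := by
  induction k generalizing r with
  | zero =>
    rw [List.length_eq_zero_iff.mp (Nat.le_zero.mp hk)]
    exact List.Pairwise.nil
  | succ k ih =>
    cases r with
    | nil => simp [pvBPassN]
    | cons p t =>
      obtain ⟨e, m, heq, -, hme, hlen⟩ := pvBPass_split t p
      show (pvBPassN k (pvBPass p t)).Pairwise _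
      rw [heq, pvBPassN_append_max k e m hme]
      rw [List.pairwise_append]
      refine ⟨ih e (by simp at hk; omega), by simp, ?_⟩
      intro a ha b hb
      rw [List.mem_singleton.mp hb]
      exact hme a ((pvBPassN_mem k e a).mp ha)

theorem pvFoldl_ins_bpassN (k : Nat) (r : List (String × List String)) :
    (pvBPassN k r).foldl (fun acc x => PySem.List.insertBy pvHlt x acc) []
      = r.foldl (fun acc x => PySem.List.insertBy pvHlt x acc) [] := by
  induction k generalizing r with
  | zero => rfl
  | succ k ih =>
    cases r with
    | nil => rfl
    | cons p t =>
      show (pvBPassN k (pvBPass p t)).foldl _ _ = _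
      rw [ih (pvBPass p t), pvFoldl_ins_bpass t p]

theorem pvRunSort (k : Nat) (r : List (String × List String)) (hk : r.length ≤ k) :
    pvBPassN k r = PySem.List.sorted2 r (fun p => pvHget p == "") (fun p => pvHget p) := by
  have h1 := pvSorted2_eq_self (pvBPassN k r) (pvBPassN_sorted k r hk)
  rw [← h1, pvSorted2_eq_foldl, pvSorted2_eq_foldl]
  exact pvFoldl_ins_bpassN k r

theorem pvGroupSort_nil : pvGroupSort [] = [] := by
  rw [pvGroupSort]

theorem pvGroupSort_cons (x : String × List String) (t : List (String × List String)) :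
    pvGroupSort (x :: t)
      = PySem.List.sorted2 (x :: t.takeWhile (fun y => pvDget y == pvDget x))
          (fun p => pvHget p == "") (fun p => pvHget p)
        ++ pvGroupSort (t.dropWhile (fun y => pvDget y == pvDget x)) := by
  rw [pvGroupSort]

theorem pvSweepN_eq_groupSort (xs : List (String × List String)) (k : Nat)
    (hk : xs.length ≤ k) : pvSweepN k xs = pvGroupSort xs := by
  induction hx : xs.length using Nat.strong_induction_on generalizing xs k with
  | _ n ih =>
    cases xs with
    | nil => rw [pvSweepN_nil, pvGroupSort_nil]
    | cons x t =>
      have hsplit : x :: t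
          = (x :: t.takeWhile (fun y => pvDget y == pvDget x))
            ++ t.dropWhile (fun y => pvDget y == pvDget x) := by
        simp [List.takeWhile_append_dropWhile]
      have h1 := List.length_dropWhile_le (fun y => pvDget y == pvDget x) t
      have h2 : (t.takeWhile (fun y => pvDget y == pvDget x)).length ≤ t.length := by
        simpa using List.Sublist.length_le (List.takeWhile_sublist _)
      simp only [List.length_cons] at hx hk
      rw [pvGroupSort_cons]
      conv_lhs => rw [hsplit]
      rw [pvSweepN_decomp k _ _ (pvDget x) (by simp) ?_ ?_, pvRunSort k _ ?_,
        ih (t.dropWhile (fun y => pvDget y == pvDget x)).length (by omega) _ k (by omega) rfl]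
      · simp only [List.length_cons]
        omega
      · intro y hy
        rcases List.mem_cons.mp hy with hy | hy
        · rw [hy]
        · simpa using List.mem_takeWhile_imp hy
      · intro h hh
        have := pvHead_dropWhile _ _ _ hh
        simpa using this

-- ===== VERDICT (by name: the statement is the Claim_ definition above) =====
theorem ordenarPorHora_spec : Claim_equal_ordenarPorHora := by
  intro itens cont _ hpre
  unfold Spec_ordenarPorHora ordenarPorHora_alt
  rcases hpre with hle | ⟨hc, _⟩
  · rw [ordenarPorHora, if_pos hle, if_pos hle]
  · by_cases hle : (itens.length : Int) ≤ cont
    · rw [ordenarPorHora, if_pos hle, if_pos hle]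
    · rw [if_neg hle, ordenarPorHora_eq_sweepN]
      subst hc
      have : ((itens.length : Int) - 0).toNat = itens.length := by omega
      rw [this]
      exact pvSweepN_eq_groupSort itens itens.length le_rfl
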